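-- pv_equiv track=rewrite | github.com/Albertree/SOAR-ARC-test | procedural_memory/base_rules/connect/connect_diamonds.py | _find_diamond_color
-- ===== SOURCE A (Python) =====
-- def _find_diamonds(grid, color):
--     """Find diamond/cross shapes of given color. Returns list of (center_r, center_c)."""
--     h = len(grid)
--     w = len(grid[0]) if grid else 0
--     diamonds = []
--     for r in range(1, h - 1):
--         for c in range(1, w - 1):
--             if (grid[r - 1][c] == color and
--                 grid[r][c - 1] == color and
--                 grid[r][c + 1] == color and
--                 grid[r + 1][c] == color and
--                 grid[r][c] != color):
--                 diamonds.append((r, c))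
--     return diamonds
--
-- def _find_diamond_color(grid):
--     """Find the color used for diamond shapes (non-bg, forms crosses)."""
--     h = len(grid)
--     w = len(grid[0]) if grid else 0
--     counts = {}
--     for r in range(h):
--         for c in range(w):
--             counts[grid[r][c]] = counts.get(grid[r][c], 0) + 1
--     bg = max(counts, key=counts.get)
--     for color in counts:
--         if color == bg:
--             continue
--         diamonds = _find_diamonds(grid, color)
--         if len(diamonds) >= 2:
--             return color, bg
--     return None, None
-- ===== SOURCE B (Python) =====
-- def _find_diamond_color(grid):
--     """Find the color used for diamond shapes (non-bg, forms crosses)."""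
--     h = len(grid)
--     w = len(grid[0]) if grid else 0
--     counts = {}
--     dcounts = {}
--     for r in range(h):
--         for c in range(w):
--             v = grid[r][c]
--             counts[v] = counts.get(v, 0) + 1
--             if 1 <= r <= h - 2 and 1 <= c <= w - 2:
--                 x = grid[r - 1][c]
--                 if (x == grid[r][c - 1] and x == grid[r][c + 1]
--                         and x == grid[r + 1][c] and x != v):
--                     dcounts[x] = dcounts.get(x, 0) + 1
--     bg = max(counts, key=counts.get)
--     for color in counts:
--         if color != bg and dcounts.get(color, 0) >= 2:
--             return color, bg
--     return None, None
-- ===== Notes on version B (the rewrite author's own statement) =====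
-- stated objective: faster
-- what changed: Instead of re-scanning the whole grid once per candidate color (_find_diamonds per color), B detects diamond centers in the single pass that also builds the color histogram, bucketing diamond counts by the cross color in a dict, then picks the first non-background color with >= 2 diamonds.
import Mathlib
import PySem

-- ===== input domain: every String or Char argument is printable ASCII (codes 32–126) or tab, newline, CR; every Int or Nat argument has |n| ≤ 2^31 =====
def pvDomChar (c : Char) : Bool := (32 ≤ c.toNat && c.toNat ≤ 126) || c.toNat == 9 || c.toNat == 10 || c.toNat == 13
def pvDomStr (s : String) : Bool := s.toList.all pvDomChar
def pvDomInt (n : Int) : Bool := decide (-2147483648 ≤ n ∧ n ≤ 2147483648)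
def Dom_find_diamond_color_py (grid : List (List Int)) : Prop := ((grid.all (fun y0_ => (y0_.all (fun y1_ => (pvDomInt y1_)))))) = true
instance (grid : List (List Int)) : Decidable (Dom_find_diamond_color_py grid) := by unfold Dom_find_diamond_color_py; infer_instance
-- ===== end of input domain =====

-- B fuses diamond detection into the single histogram pass (one O(h*w) scan, diamond counts
-- bucketed by cross color) instead of A's per-color whole-grid re-scan; return value only.

-- ===== PORT A =====
-- w = len(grid[0]) if grid else 0   (shared, verbatim, by both Pythons)
def pvWidth (grid : List (List Int)) : Int :=
  match grid with | [] => 0 | row :: _ => (row.length : Int)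

-- grid[r][c]; total form of Python's indexing, exact under Pre_ (indices in range there)
def pvCell (grid : List (List Int)) (r c : Int) : Int :=
  PySem.List.pyGetD (PySem.List.pyGetD grid r []) c 0

-- counts[grid[r][c]] = counts.get(grid[r][c], 0) + 1   (shared, verbatim, by both Pythons)
def pvStep1 (grid : List (List Int)) (r : Int) (d : PySem.Dict Int Int) (c : Int) :
    PySem.Dict Int Int :=
  d.insert (pvCell grid r c) (d.getD (pvCell grid r c) 0 + 1)

def pyFindDiamonds (grid : List (List Int)) (color : Int) : List (Int × Int) :=
  let h : Int := grid.length
  let w : Int := pvWidth grid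
  (PySem.List.pyRange 1 (h - 1) 1).foldl (fun ds r =>
    (PySem.List.pyRange 1 (w - 1) 1).foldl (fun ds c =>
      if pvCell grid (r - 1) c == color && pvCell grid r (c - 1) == color &&
         pvCell grid r (c + 1) == color && pvCell grid (r + 1) c == color &&
         pvCell grid r c != color
      then ds ++ [(r, c)] else ds) ds) []

def find_diamond_color_py (grid : List (List Int)) : Option Int × Option Int :=
  let h : Int := grid.length
  let w : Int := pvWidth grid
  let counts : PySem.Dict Int Int :=
    (PySem.List.pyRange 0 h 1).foldl (fun d r =>
      (PySem.List.pyRange 0 w 1).foldl (pvStep1 grid r) d) PySem.Dict.empty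
  match PySem.List.max? counts.keys (fun k => counts.getD k 0) with
  | none => (none, none)  -- Python: max over an empty dict raises ValueError; excluded by Pre_
  | some bg =>
    match counts.keys.foldl (fun acc color =>
      match acc with
      | some _ => acc
      | none =>
        if color = bg then none
        else if 2 ≤ (pyFindDiamonds grid color).length then some color else none) none with
    | some color => (some color, some bg)
    | none => (none, none)

-- ===== PORT B =====
-- diamond-center test at (r,c): if interior and the four neighbours share a color x ≠ center,
-- count one diamond for x (dcounts[x] = dcounts.get(x, 0) + 1)
def pvDCStep (grid : List (List Int)) (h w r : Int) (d : PySem.Dict Int Int) (c : Int) :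
    PySem.Dict Int Int :=
  if 1 ≤ r ∧ r ≤ h - 2 ∧ 1 ≤ c ∧ c ≤ w - 2 then
    let x := pvCell grid (r - 1) c
    if x == pvCell grid r (c - 1) && x == pvCell grid r (c + 1) &&
       x == pvCell grid (r + 1) c && x != pvCell grid r c
    then d.insert x (d.getD x 0 + 1) else d
  else d

def find_diamond_color_py_alt (grid : List (List Int)) : Option Int × Option Int :=
  let h : Int := grid.length
  let w : Int := pvWidth grid
  let p :=
    (PySem.List.pyRange 0 h 1).foldl (fun p r =>
      (PySem.List.pyRange 0 w 1).foldl (fun p c =>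
        (pvStep1 grid r p.1 c, pvDCStep grid h w r p.2 c)) p)
      (PySem.Dict.empty, PySem.Dict.empty)
  let counts := p.1
  let dcounts := p.2
  match PySem.List.max? counts.keys (fun k => counts.getD k 0) with
  | none => (none, none)
  | some bg =>
    match counts.keys.foldl (fun acc color =>
      match acc with
      | some _ => acc
      | none =>
        if color ≠ bg ∧ 2 ≤ dcounts.getD color 0 then some color else none) none with
    | some color => (some color, some bg)
    | none => (none, none)

-- ===== PRECONDITION & SPEC =====
-- Pre_ excludes exactly the inputs where Python A raises: the empty grid and a grid whose first
-- row is empty (max over an empty dict raises ValueError), and grids with a row shorter than the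
-- first row (IndexError); rows longer than the first row are admitted (A returns there).
def Pre_find_diamond_color_py (grid : List (List Int)) : Prop :=
  grid ≠ [] ∧ grid.headD [] ≠ [] ∧ ∀ row ∈ grid, (grid.headD []).length ≤ row.length
instance (grid : List (List Int)) : Decidable (Pre_find_diamond_color_py grid) := by
  unfold Pre_find_diamond_color_py; infer_instance

def pvWitness_find_diamond_color_py : List (List Int) := [[1, 2], [3, 4]]

def Spec_find_diamond_color_py (grid : List (List Int)) (out : Option Int × Option Int) : Prop :=
  out = find_diamond_color_py_alt grid
instance (grid : List (List Int)) (out : Option Int × Option Int) :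
    Decidable (Spec_find_diamond_color_py grid out) := by
  unfold Spec_find_diamond_color_py; infer_instance

-- ===== CLAIM (what is proved, stated in full; the proofs are below) =====
def Claim_equal_find_diamond_color_py : Prop :=
  ∀ (grid : List (List Int)), Dom_find_diamond_color_py grid →
    Pre_find_diamond_color_py grid →
    Spec_find_diamond_color_py grid (find_diamond_color_py grid)

-- ===== LEMMAS AND PROOFS =====

-- a fold whose every step adds cnt x to the measure μ adds the total
theorem pvFoldlMeasure {σ α : Type} (μ : σ → Int) (step : σ → α → σ) (cnt : α → Int)
    (hstep : ∀ s x, μ (step s x) = μ s + cnt x) :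
    ∀ (l : List α) (s : σ), μ (l.foldl step s) = μ s + (l.map cnt).sum := by
  intro l
  induction l with
  | nil => intro s; simp
  | cons x xs ih => intro s; simp [List.foldl_cons, ih, hstep]; ring

-- a sum over range(0, n) of a function vanishing outside [1, n-2] is the sum over range(1, n-1)
theorem pvSumRestrict (n : Int) (f : Int → Int)
    (hf : ∀ r, ¬(1 ≤ r ∧ r ≤ n - 2) → f r = 0) :
    ((PySem.List.pyRange 0 n 1).map f).sum = ((PySem.List.pyRange 1 (n - 1) 1).map f).sum := by
  by_cases h2 : 2 ≤ n
  · rw [PySem.List.pyRange_one_append 0 1 n (by omega) (by omega),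
        PySem.List.pyRange_one_append 1 (n - 1) n (by omega) (by omega)]
    have e0 : PySem.List.pyRange 0 1 1 = [0] := by
      have := PySem.List.pyRange_one_singleton (a := (0 : Int)); simpa using this
    have e1 : PySem.List.pyRange (n - 1) n 1 = [n - 1] := by
      have := PySem.List.pyRange_one_singleton (a := n - 1)
      simpa [sub_add_cancel] using this
    rw [e0, e1]
    simp [List.map_append, List.sum_append, hf 0 (by omega), hf (n - 1) (by omega)]
  · have hnil : PySem.List.pyRange 1 (n - 1) 1 = [] :=
      PySem.List.pyRange_one_eq_nil (by omega)
    rw [hnil]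
    rcases (by omega : n ≤ 0 ∨ n = 1) with h | h
    · rw [PySem.List.pyRange_one_eq_nil (by omega)]
    · subst h
      have e0 : PySem.List.pyRange 0 1 1 = [0] := by
        have := PySem.List.pyRange_one_singleton (a := (0 : Int)); simpa using this
      rw [e0]; simp [hf 0 (by omega)]

-- per-cell diamond contribution of color v at (r, c) (B's condition, key = cross color)
def pvBcnt (grid : List (List Int)) (h w v r c : Int) : Int :=
  if (1 ≤ r ∧ r ≤ h - 2 ∧ 1 ≤ c ∧ c ≤ w - 2) ∧
     (pvCell grid (r - 1) c == pvCell grid r (c - 1) &&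
      pvCell grid (r - 1) c == pvCell grid r (c + 1) &&
      pvCell grid (r - 1) c == pvCell grid (r + 1) c &&
      pvCell grid (r - 1) c != pvCell grid r c) = true ∧
     pvCell grid (r - 1) c = v
  then 1 else 0

-- per-cell contribution in A's per-color scan
def pvAcnt (grid : List (List Int)) (v r c : Int) : Int :=
  if (pvCell grid (r - 1) c == v && pvCell grid r (c - 1) == v &&
      pvCell grid r (c + 1) == v && pvCell grid (r + 1) c == v &&
      pvCell grid r c != v) = true
  then 1 else 0

theorem pvDCStep_getD (grid : List (List Int)) (h w v r : Int)
    (d : PySem.Dict Int Int) (c : Int) :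
    (pvDCStep grid h w r d c).getD v 0 = d.getD v 0 + pvBcnt grid h w v r c := by
  simp only [pvDCStep, pvBcnt]
  by_cases hb : 1 ≤ r ∧ r ≤ h - 2 ∧ 1 ≤ c ∧ c ≤ w - 2
  · rw [if_pos hb]
    by_cases hcross : (pvCell grid (r - 1) c == pvCell grid r (c - 1) &&
        pvCell grid (r - 1) c == pvCell grid r (c + 1) &&
        pvCell grid (r - 1) c == pvCell grid (r + 1) c &&
        pvCell grid (r - 1) c != pvCell grid r c) = true
    · rw [if_pos hcross]
      by_cases hx : pvCell grid (r - 1) c = v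
      · rw [if_pos ⟨hb, hcross, hx⟩, PySem.Dict.getD_insert, if_pos hx.symm, hx]
      · rw [if_neg (fun hcon => hx hcon.2.2), PySem.Dict.getD_insert,
            if_neg (fun hvx => hx hvx.symm), add_zero]
    · rw [if_neg hcross, if_neg (fun hcon => hcross hcon.2.1), add_zero]
  · rw [if_neg hb, if_neg (fun hcon => hb hcon.1), add_zero]

theorem pvAstep_len (grid : List (List Int)) (v r : Int)
    (ds : List (Int × Int)) (c : Int) :
    ((if pvCell grid (r - 1) c == v && pvCell grid r (c - 1) == v &&
         pvCell grid r (c + 1) == v && pvCell grid (r + 1) c == v &&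
         pvCell grid r c != v
      then ds ++ [(r, c)] else ds).length : Int) = (ds.length : Int) + pvAcnt grid v r c := by
  unfold pvAcnt
  split_ifs <;> simp

-- inside the interior box the two per-cell contributions for color v coincide
theorem pvBcnt_eq_pvAcnt (grid : List (List Int)) (h w v r c : Int)
    (hr : 1 ≤ r ∧ r ≤ h - 2) (hc : 1 ≤ c ∧ c ≤ w - 2) :
    pvBcnt grid h w v r c = pvAcnt grid v r c := by
  simp only [pvBcnt, pvAcnt, Bool.and_eq_true, beq_iff_eq, bne_iff_ne]
  exact if_congr (by constructor <;> (intro hh; omega)) rfl rfl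

-- the diamond count bucketed for v by the pvDCStep pass, for ANY bounds h w
theorem pvCore (grid : List (List Int)) (h w v : Int) :
    (((PySem.List.pyRange 0 h 1).foldl (fun d r =>
        (PySem.List.pyRange 0 w 1).foldl (pvDCStep grid h w r) d)
        PySem.Dict.empty).getD v 0) =
    ((PySem.List.pyRange 1 (h - 1) 1).map (fun r =>
        ((PySem.List.pyRange 1 (w - 1) 1).map (pvAcnt grid v r)).sum)).sum := by
  have hinner : ∀ (r : Int) (d : PySem.Dict Int Int),
      ((PySem.List.pyRange 0 w 1).foldl (pvDCStep grid h w r) d).getD v 0 =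
        d.getD v 0 + ((PySem.List.pyRange 0 w 1).map (pvBcnt grid h w v r)).sum :=
    fun r d => pvFoldlMeasure (fun d => d.getD v 0) (pvDCStep grid h w r)
      (pvBcnt grid h w v r) (pvDCStep_getD grid h w v r) _ d
  have houter :
      ((PySem.List.pyRange 0 h 1).foldl (fun d r =>
        (PySem.List.pyRange 0 w 1).foldl (pvDCStep grid h w r) d)
        PySem.Dict.empty).getD v 0 =
      (PySem.Dict.empty : PySem.Dict Int Int).getD v 0 +
        ((PySem.List.pyRange 0 h 1).map (fun r =>
          ((PySem.List.pyRange 0 w 1).map (pvBcnt grid h w v r)).sum)).sum :=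
    pvFoldlMeasure (fun d => d.getD v 0) _
      (fun r => ((PySem.List.pyRange 0 w 1).map (pvBcnt grid h w v r)).sum)
      (fun d r => hinner r d) _ _
  rw [houter, PySem.Dict.getD_empty]
  rw [pvSumRestrict h _ ?hzero]
  case hzero =>
    intro r hr
    apply List.sum_eq_zero
    intro x hx
    rcases List.mem_map.mp hx with ⟨c, _, rfl⟩
    unfold pvBcnt
    rw [if_neg]; tauto
  rw [zero_add]
  refine congrArg List.sum (List.map_congr_left ?_)
  intro r hr
  have hrb := (PySem.List.mem_pyRange_one).mp hr
  rw [pvSumRestrict w _ ?czero]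
  case czero =>
    intro c hc
    unfold pvBcnt
    rw [if_neg]; tauto
  refine congrArg List.sum (List.map_congr_left ?_)
  intro c hc
  have hcb := (PySem.List.mem_pyRange_one).mp hc
  exact pvBcnt_eq_pvAcnt grid h w v r c (by omega) (by omega)

-- the length of A's per-color diamond list as the same double sum
theorem pvLen (grid : List (List Int)) (v : Int) :
    ((pyFindDiamonds grid v).length : Int) =
    ((PySem.List.pyRange 1 ((grid.length : Int) - 1) 1).map (fun r =>
        ((PySem.List.pyRange 1 (pvWidth grid - 1) 1).map (pvAcnt grid v r)).sum)).sum := by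
  simp only [pyFindDiamonds]
  have hAinner : ∀ (r : Int) (ds : List (Int × Int)),
      (((PySem.List.pyRange 1 (pvWidth grid - 1) 1).foldl (fun ds c =>
        if pvCell grid (r - 1) c == v && pvCell grid r (c - 1) == v &&
           pvCell grid r (c + 1) == v && pvCell grid (r + 1) c == v &&
           pvCell grid r c != v
        then ds ++ [(r, c)] else ds) ds).length : Int) =
        (ds.length : Int) +
          ((PySem.List.pyRange 1 (pvWidth grid - 1) 1).map (pvAcnt grid v r)).sum :=
    fun r ds => pvFoldlMeasure (fun ds => ((ds : List (Int × Int)).length : Int)) _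
      (pvAcnt grid v r) (pvAstep_len grid v r) _ ds
  have := pvFoldlMeasure (σ := List (Int × Int)) (fun ds => (ds.length : Int))
    (fun ds r => (PySem.List.pyRange 1 (pvWidth grid - 1) 1).foldl (fun ds c =>
      if pvCell grid (r - 1) c == v && pvCell grid r (c - 1) == v &&
         pvCell grid r (c + 1) == v && pvCell grid (r + 1) c == v &&
         pvCell grid r c != v
      then ds ++ [(r, c)] else ds) ds)
    (fun r => ((PySem.List.pyRange 1 (pvWidth grid - 1) 1).map (pvAcnt grid v r)).sum)
    (fun ds r => hAinner r ds) (PySem.List.pyRange 1 ((grid.length : Int) - 1) 1) []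
  simpa using this

-- ===== VERDICT (by name: the statement is the Claim_ definition above) =====
theorem find_diamond_color_py_spec : Claim_equal_find_diamond_color_py := by
  intro grid _ _
  unfold Spec_find_diamond_color_py
  simp only [find_diamond_color_py, find_diamond_color_py_alt]
  -- split B's paired fold into its two components
  rw [show (fun (p : PySem.Dict Int Int × PySem.Dict Int Int) (r : Int) =>
        (PySem.List.pyRange 0 (pvWidth grid) 1).foldl (fun p c =>
          (pvStep1 grid r p.1 c,
           pvDCStep grid (grid.length : Int) (pvWidth grid) r p.2 c)) p) =
      (fun p r => ((PySem.List.pyRange 0 (pvWidth grid) 1).foldl (pvStep1 grid r) p.1,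
                   (PySem.List.pyRange 0 (pvWidth grid) 1).foldl
                     (pvDCStep grid (grid.length : Int) (pvWidth grid) r) p.2)) from
    funext fun p => funext fun r =>
      PySem.List.foldl_prod_mk (f := pvStep1 grid r)
        (g := pvDCStep grid (grid.length : Int) (pvWidth grid) r) _ _ _]
  rw [PySem.List.foldl_prod_mk
    (f := fun d r => (PySem.List.pyRange 0 (pvWidth grid) 1).foldl (pvStep1 grid r) d)
    (g := fun d r => (PySem.List.pyRange 0 (pvWidth grid) 1).foldl
      (pvDCStep grid (grid.length : Int) (pvWidth grid) r) d)]
  have hcnt : ∀ v : Int,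
      (((PySem.List.pyRange 0 (grid.length : Int) 1).foldl (fun d r =>
        (PySem.List.pyRange 0 (pvWidth grid) 1).foldl
          (pvDCStep grid (grid.length : Int) (pvWidth grid) r) d)
        PySem.Dict.empty).getD v 0) = ((pyFindDiamonds grid v).length : Int) :=
    fun v => (pvCore grid (grid.length : Int) (pvWidth grid) v).trans (pvLen grid v).symm
  cases hmax : PySem.List.max?
      (((PySem.List.pyRange 0 (grid.length : Int) 1).foldl (fun d r =>
        (PySem.List.pyRange 0 (pvWidth grid) 1).foldl (pvStep1 grid r) d)
        PySem.Dict.empty).keys) (fun k =>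
      (((PySem.List.pyRange 0 (grid.length : Int) 1).foldl (fun d r =>
        (PySem.List.pyRange 0 (pvWidth grid) 1).foldl (pvStep1 grid r) d)
        PySem.Dict.empty).getD k 0)) with
  | none => simp
  | some bg =>
    simp only [hmax]
    have hsteps : ∀ (acc : Option Int) (color : Int),
        (match acc with
         | some _ => acc
         | none =>
           if color = bg then none
           else if 2 ≤ (pyFindDiamonds grid color).length then some color else none) =
        (match acc with
         | some _ => acc
         | none =>
           if color ≠ bg ∧
              2 ≤ (((PySem.List.pyRange 0 (grid.length : Int) 1).foldl (fun d r =>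
                (PySem.List.pyRange 0 (pvWidth grid) 1).foldl
                  (pvDCStep grid (grid.length : Int) (pvWidth grid) r) d)
                PySem.Dict.empty).getD color 0)
           then some color else none) := by
      intro acc color
      cases acc with
      | some _ => rfl
      | none =>
        rw [hcnt color]
        by_cases hbg : color = bg
        · subst hbg; simp
        · by_cases hlen : 2 ≤ (pyFindDiamonds grid color).length
          · have h2 : (2 : Int) ≤ ((pyFindDiamonds grid color).length : Int) := by
              exact_mod_cast hlen
            simp [hbg, hlen, h2]
          · have h2 : ¬ (2 : Int) ≤ ((pyFindDiamonds grid color).length : Int) := by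
              exact_mod_cast hlen
            simp [hbg, hlen, h2]
    have hfold :
        ((((PySem.List.pyRange 0 (grid.length : Int) 1).foldl (fun d r =>
          (PySem.List.pyRange 0 (pvWidth grid) 1).foldl (pvStep1 grid r) d)
          PySem.Dict.empty).keys).foldl (fun acc color =>
            match acc with
            | some _ => acc
            | none =>
              if color = bg then none
              else if 2 ≤ (pyFindDiamonds grid color).length then some color
              else none) none) =
        ((((PySem.List.pyRange 0 (grid.length : Int) 1).foldl (fun d r =>
          (PySem.List.pyRange 0 (pvWidth grid) 1).foldl (pvStep1 grid r) d)
          PySem.Dict.empty).keys).foldl (fun acc color =>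
            match acc with
            | some _ => acc
            | none =>
              if color ≠ bg ∧
                 2 ≤ (((PySem.List.pyRange 0 (grid.length : Int) 1).foldl (fun d r =>
                   (PySem.List.pyRange 0 (pvWidth grid) 1).foldl
                     (pvDCStep grid (grid.length : Int) (pvWidth grid) r) d)
                   PySem.Dict.empty).getD color 0)
              then some color else none) none) :=
      by apply PySem.List.foldl_congr_mem; exact fun acc color _ => hsteps acc color
    rw [hfold]
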